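-- pv_equiv track=rewrite | github.com/MarcTheSpark/scamp_extensions | misc/junk/indispensability.py | decompose_to_twos_and_threes
-- ===== SOURCE A (Python) =====
-- def decompose_to_twos_and_threes(n):
--     """
--     Split an integer into a list of 2's and possible one 3 that add up to it
--
--     :param n: the int
--     :return: a list of 2's and possible one three
--     """
--     assert isinstance(n, int)
--     out = []
--     if n % 2 == 1:
--         n -= 3
--         out.append(3)
--
--     while n > 0:
--         n -= 2
--         out.append(2)
--
--     out.reverse()
--     return out
-- ===== SOURCE B (Python) =====
-- def decompose_to_twos_and_threes(n):
--     """
--     Split an integer into a list of 2's and possible one 3 that add up to it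
--
--     :param n: the int
--     :return: a list of 2's and possible one three
--     """
--     assert isinstance(n, int)
--     if n % 2 == 1:
--         return [2] * max(0, (n - 3) // 2) + [3]
--     return [2] * max(0, n // 2)
-- ===== Notes on version B (the rewrite author's own statement) =====
-- stated objective: simpler
-- what changed: The while loop that repeatedly subtracts and appends is replaced by a closed-form count: the number of twos is computed arithmetically with a floor division clamped at zero and the list built by replication, with the optional three placed last directly instead of appending first and reversing.
import Mathlib
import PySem

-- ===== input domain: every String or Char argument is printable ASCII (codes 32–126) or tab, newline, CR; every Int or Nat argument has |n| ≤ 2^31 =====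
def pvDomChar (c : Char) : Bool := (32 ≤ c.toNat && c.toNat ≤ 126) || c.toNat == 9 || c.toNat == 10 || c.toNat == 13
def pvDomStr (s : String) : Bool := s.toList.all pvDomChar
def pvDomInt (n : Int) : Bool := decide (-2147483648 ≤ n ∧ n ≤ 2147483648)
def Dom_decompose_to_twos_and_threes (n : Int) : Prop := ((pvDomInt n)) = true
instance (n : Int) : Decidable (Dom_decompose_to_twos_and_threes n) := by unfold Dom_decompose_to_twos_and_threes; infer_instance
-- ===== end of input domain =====

-- B replaces the subtracting while loop by a closed-form count (list replication), placing the optional three last directly instead of append-then-reverse: simpler, no loop.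
-- ===== PORT A =====
-- literal port of A's while loop: subtract 2 and append 2 while n > 0
def decomposeLoop (n : Int) (out : List Int) : List Int :=
  if h : n > 0 then decomposeLoop (n - 2) (out ++ [2]) else out
  termination_by n.toNat
  decreasing_by omega

def decompose_to_twos_and_threes (n : Int) : List Int :=
  let out : List Int := []
  let (n, out) := if PySem.Int.mod n 2 = 1 then (n - 3, out ++ [3]) else (n, out)
  (decomposeLoop n out).reverse

-- ===== PORT B =====
def decompose_to_twos_and_threes_alt (n : Int) : List Int :=
  if PySem.Int.mod n 2 = 1 then
    List.replicate (max 0 (PySem.Int.floordiv (n - 3) 2)).toNat 2 ++ [3]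
  else
    List.replicate (max 0 (PySem.Int.floordiv n 2)).toNat 2

-- ===== PRECONDITION & SPEC =====
def Spec_decompose_to_twos_and_threes (n : Int) (out : List Int) : Prop := out = decompose_to_twos_and_threes_alt n
instance (n : Int) (out : List Int) : Decidable (Spec_decompose_to_twos_and_threes n out) := by unfold Spec_decompose_to_twos_and_threes; infer_instance

-- ===== CLAIM (what is proved, stated in full; the proofs are below) =====
def Claim_equal_decompose_to_twos_and_threes : Prop := ∀ (n : Int), Dom_decompose_to_twos_and_threes n → Spec_decompose_to_twos_and_threes n (decompose_to_twos_and_threes n)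

-- ===== LEMMAS AND PROOFS =====

theorem decomposeLoop_even (k : Nat) : ∀ (m : Int), m.toNat = 2 * k → m % 2 = 0 → ∀ out : List Int,
    decomposeLoop m out = out ++ List.replicate k 2 := by
  induction k with
  | zero =>
    intro m hm _ out
    rw [decomposeLoop]
    simp only [List.replicate_zero, List.append_nil]
    split
    · omega
    · rfl
  | succ k ih =>
    intro m hm he out
    rw [decomposeLoop]
    have hpos : m > 0 := by omega
    simp only [hpos, dite_true]
    rw [ih (m - 2) (by omega) (by omega)]
    simp [List.replicate_succ]

theorem floordiv_two_toNat (m : Int) (he : m % 2 = 0) :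
    2 * (max 0 (PySem.Int.floordiv m 2)).toNat = m.toNat := by
  have h := PySem.Int.floordiv_mul_add_mod m 2
  have h2 : PySem.Int.mod m 2 = 0 := by
    rw [PySem.Int.mod_eq_emod_of_pos (by omega)]; omega
  omega

-- ===== VERDICT (by name: the statement is the Claim_ definition above) =====
theorem decompose_to_twos_and_threes_spec : Claim_equal_decompose_to_twos_and_threes := by
  intro n _
  unfold Spec_decompose_to_twos_and_threes decompose_to_twos_and_threes decompose_to_twos_and_threes_alt
  have hmod : PySem.Int.mod n 2 = n % 2 := PySem.Int.mod_eq_emod_of_pos (by omega)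
  by_cases hodd : PySem.Int.mod n 2 = 1
  · simp only [hodd, if_true]
    have he : (n - 3) % 2 = 0 := by omega
    rw [decomposeLoop_even (max 0 (PySem.Int.floordiv (n - 3) 2)).toNat (n - 3)
      (by have := floordiv_two_toNat (n - 3) he; omega) he]
    simp
  · simp only [hodd, if_false]
    have he : n % 2 = 0 := by omega
    rw [decomposeLoop_even (max 0 (PySem.Int.floordiv n 2)).toNat n
      (by have := floordiv_two_toNat n he; omega) he]
    simp
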